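-- pv_equiv track=rewrite | github.com/bashcas/Algorithms-and-Data-Structures-Specialization | 1-algorithms/week3_greedy_algorithms/6_maximum_number_of_prizes/different_summands.py | optimal_summands_naive
-- ===== SOURCE A (Python) =====
-- def optimal_summands_naive(n):
--     summands = []
--     map = {}
--     aux = 1
--     times = 0
--     for i in range(1, n + 1):
--         if times == aux + 1:
--             times = 0
--             aux += 1
--         map[i] = aux
--         times += 1
--     summands = [i for i in range(1, map[n] + 1)]
--     summands.pop()
--     sum = 0
--     for number in summands:
--         sum += number
--     summands.append(n - sum)
--     return summands
-- ===== SOURCE B (Python) =====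
-- def optimal_summands_naive(n):
--     # Greedy: take 1, 2, 3, ... while the remainder stays larger than the
--     # next candidate; the leftover becomes the last (largest) summand.
--     summands = []
--     k = 1
--     while n > 2 * k:
--         summands.append(k)
--         n -= k
--         k += 1
--     summands.append(n)
--     return summands
-- ===== Notes on version B (the rewrite author's own statement) =====
-- stated objective: faster
-- what changed: Replaces the O(n) dict-building pass (labelling every i in 1..n with its block number, then reading map[n] and rebuilding the prefix 1..k-1) by the direct greedy loop that emits 1,2,3,... while the remainder exceeds twice the next candidate and appends the leftover, O(sqrt(n)).
import Mathlib
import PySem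

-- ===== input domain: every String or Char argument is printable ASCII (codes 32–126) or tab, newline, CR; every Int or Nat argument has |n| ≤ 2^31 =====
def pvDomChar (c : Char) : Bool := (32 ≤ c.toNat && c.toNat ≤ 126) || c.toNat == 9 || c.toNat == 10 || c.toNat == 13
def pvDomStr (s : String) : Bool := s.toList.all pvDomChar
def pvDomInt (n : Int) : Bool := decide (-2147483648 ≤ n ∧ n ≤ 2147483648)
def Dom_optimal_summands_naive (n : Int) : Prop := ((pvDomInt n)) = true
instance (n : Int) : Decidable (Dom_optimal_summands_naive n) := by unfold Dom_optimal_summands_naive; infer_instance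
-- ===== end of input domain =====

-- B replaces A's linear dict-labelling pass by the direct greedy subtraction loop (objective: faster).

-- ===== PORT A =====
-- one iteration of A's for-loop: state (map, aux, times)
def osnStep (st : PySem.Dict Int Int × Int × Int) (i : Int) : PySem.Dict Int Int × Int × Int :=
  let m := st.1
  let aux := st.2.1
  let times := st.2.2
  let aux' := if times == aux + 1 then aux + 1 else aux
  let times' := if times == aux + 1 then (0 : Int) else times
  (m.insert i aux', aux', times' + 1)

def optimal_summands_naive (n : Int) : List Int :=
  let st := (PySem.List.pyRange 1 (n + 1) 1).foldl osnStep (PySem.Dict.empty, 1, 0)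
  match st.1.get? n with
  | none => []        -- Python raises KeyError here (n ≤ 0); excluded by Pre_
  | some k =>
    let summands := PySem.List.pyRange 1 (k + 1) 1
    match PySem.List.pop? summands (-1) with
    | none => []      -- Python raises IndexError on pop from empty (unreachable for n ≥ 1)
    | some p =>
      let summands := p.2
      let s := summands.foldl (fun acc number => acc + number) 0
      summands ++ [n - s]

-- ===== PORT B =====
-- Source B's while-loop: candidate k = j + 1, where j counts completed iterations
def osnGreedy (n : Int) (j : Nat) : List Int :=
  let k : Int := (j : Int) + 1
  if n > 2 * k then k :: osnGreedy (n - k) (j + 1) else [n]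
termination_by n.toNat
decreasing_by simp only [Int.lt_iff_add_one_le] at *; omega

def optimal_summands_naive_alt (n : Int) : List Int :=
  osnGreedy n 0

-- ===== PRECONDITION & SPEC =====
-- Pre_ excludes exactly n ≤ 0, where A raises KeyError (the labelling loop is empty, so map[n] is missing).
def Pre_optimal_summands_naive (n : Int) : Prop := 1 ≤ n
instance (n : Int) : Decidable (Pre_optimal_summands_naive n) := by unfold Pre_optimal_summands_naive; infer_instance
def pvWitness_optimal_summands_naive : Int := 5

def Spec_optimal_summands_naive (n : Int) (out : List Int) : Prop := out = optimal_summands_naive_alt n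
instance (n : Int) (out : List Int) : Decidable (Spec_optimal_summands_naive n out) := by unfold Spec_optimal_summands_naive; infer_instance

-- ===== CLAIM (what is proved, stated in full; the proofs are below) =====
def Claim_equal_optimal_summands_naive : Prop := ∀ (n : Int), Dom_optimal_summands_naive n → Pre_optimal_summands_naive n → Spec_optimal_summands_naive n (optimal_summands_naive n)

-- ===== LEMMAS AND PROOFS =====

-- triangle numbers T k = 1 + 2 + ... + k
def osnT : Nat → Nat
  | 0 => 0
  | k + 1 => osnT k + (k + 1)

theorem osnT_mono {a b : Nat} (h : a ≤ b) : osnT a ≤ osnT b := by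
  induction b with
  | zero => simp [Nat.le_zero.mp h]
  | succ b ih =>
    rcases Nat.lt_or_ge a (b + 1) with h' | h'
    · exact le_trans (ih (by omega)) (by simp [osnT])
    · have : a = b + 1 := by omega
      simp [this]

-- A's loop invariant: after folding over [1..n] (n = m+1) the dict maps n to aux = j+1,
-- with T (j+1) ≤ n and times = n - T (j+1) + 1 ≤ j + 2.
theorem osn_loop_inv (m : Nat) :
    ∃ (j : Nat) (d : PySem.Dict Int Int) (t : Int),
      (PySem.List.pyRange 1 (((m : Int) + 1) + 1) 1).foldl osnStep (PySem.Dict.empty, 1, 0)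
        = (d, (j : Int) + 1, t)
      ∧ d.get? ((m : Int) + 1) = some ((j : Int) + 1)
      ∧ (osnT (j + 1) : Int) ≤ (m : Int) + 1
      ∧ t = ((m : Int) + 1) - (osnT (j + 1) : Int) + 1
      ∧ t ≤ (j : Int) + 2 := by
  induction m with
  | zero =>
    refine ⟨0, PySem.Dict.empty.insert 1 1, 1, ?_, ?_, ?_, ?_, ?_⟩ <;>
      simp [PySem.List.pyRange, osnStep, osnT, PySem.Dict.get?_insert_self]
  | succ m ih =>
    obtain ⟨j, d, t, hfold, hget, hT, ht, htle⟩ := ih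
    have hstep : (osnT (j + 1 + 1) : Int) = (osnT (j + 1) : Int) + ((j : Int) + 1 + 1) := by
      show ((osnT (j + 1) + (j + 1 + 1) : Nat) : Int) = _
      push_cast; ring
    have hsplit : PySem.List.pyRange 1 ((((m + 1 : Nat)) : Int) + 1 + 1) 1
        = PySem.List.pyRange 1 (((m : Int) + 1) + 1) 1 ++ [((m : Int) + 1) + 1] := by
      have h := PySem.List.pyRange_one_succ_right (a := 1) (b := ((m : Int) + 1) + 1) (by omega)
      push_cast
      convert h using 3
    rw [hsplit, List.foldl_append, hfold]
    simp only [List.foldl_cons, List.foldl_nil]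
    by_cases hc : t = (j : Int) + 1 + 1
    · -- the block for aux = j+1 is full: a new block starts at i = m+2
      have hcb : (t == (j : Int) + 1 + 1) = true := by simp [hc]
      refine ⟨j + 1, d.insert (((m : Int) + 1) + 1) ((j : Int) + 1 + 1), 1, ?_, ?_, ?_, ?_, ?_⟩
      · simp only [osnStep, hcb, if_true]
        push_cast; ring_nf
      · rw [show (((m + 1 : Nat)) : Int) + 1 = ((m : Int) + 1) + 1 by push_cast; ring]
        rw [PySem.Dict.get?_insert_self]
        push_cast; ring_nf
      · push_cast at hstep ht hT ⊢; omega
      · push_cast at hstep ht hT ⊢; omega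
      · push_cast; omega
    · -- still inside the block for aux = j+1
      have hcb : (t == (j : Int) + 1 + 1) = false := by simp [hc]
      refine ⟨j, d.insert (((m : Int) + 1) + 1) ((j : Int) + 1), t + 1, ?_, ?_, ?_, ?_, ?_⟩
      · simp only [osnStep, hcb, Bool.false_eq_true, if_false]
      · rw [show (((m + 1 : Nat)) : Int) + 1 = ((m : Int) + 1) + 1 by push_cast; ring]
        exact PySem.Dict.get?_insert_self _ _ _
      · push_cast at hT ⊢; omega
      · push_cast at ht ⊢; omega
      · omega

-- the sum of [1..k] as computed by A's folding loop
theorem osn_sum_pyRange (k : Nat) :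
    (PySem.List.pyRange 1 ((k : Int) + 1) 1).foldl (fun acc number => acc + number) 0
      = (osnT k : Int) := by
  induction k with
  | zero => simp [PySem.List.pyRange, osnT]
  | succ k ih =>
    have h := PySem.List.pyRange_one_succ_right (a := 1) (b := (k : Int) + 1) (by omega)
    have hsplit : PySem.List.pyRange 1 (((k + 1 : Nat) : Int) + 1) 1
        = PySem.List.pyRange 1 ((k : Int) + 1) 1 ++ [(k : Int) + 1] := by
      push_cast
      convert h using 3
    rw [hsplit, List.foldl_append, ih]
    simp only [List.foldl_cons, List.foldl_nil]
    show (osnT k : Int) + ((k : Int) + 1) = ((osnT k + (k + 1) : Nat) : Int)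
    push_cast; ring

-- B's greedy loop, characterised: with candidate k = j+1 and remainder n - T j
-- it emits j+1, ..., j+d and then the leftover n - T (j+d).
theorem osn_greedy_spec (d j : Nat) (n : Int)
    (hlo : (osnT (j + 1 + d) : Int) ≤ n)
    (hhi : n < (osnT (j + 1 + d) : Int) + ((j : Int) + 1 + (d : Int)) + 1) :
    osnGreedy (n - (osnT j : Int)) j
      = PySem.List.pyRange ((j : Int) + 1) ((j : Int) + 1 + (d : Int)) 1
          ++ [n - (osnT (j + d) : Int)] := by
  induction d generalizing j n with
  | zero =>
    have hstep : (osnT (j + 1) : Int) = (osnT j : Int) + ((j : Int) + 1) := by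
      show ((osnT j + (j + 1) : Nat) : Int) = _
      push_cast; ring
    rw [osnGreedy]
    have hcond : ¬ (n - (osnT j : Int) > 2 * ((j : Int) + 1)) := by
      simp only [Nat.add_zero] at hhi hlo
      push_cast at hhi
      omega
    simp only [hcond, if_false]
    rw [PySem.List.pyRange_one_eq_nil (by push_cast; omega)]
    simp only [List.nil_append, Nat.add_zero]
  | succ d ih =>
    have hstep : (osnT (j + 1) : Int) = (osnT j : Int) + ((j : Int) + 1) := by
      show ((osnT j + (j + 1) : Nat) : Int) = _
      push_cast; ring
    have hstep2 : (osnT (j + 2) : Int) = (osnT (j + 1) : Int) + ((j : Int) + 2) := by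
      show ((osnT (j + 1) + (j + 1 + 1) : Nat) : Int) = _
      push_cast; ring
    have hmono : (osnT (j + 2) : Int) ≤ (osnT (j + 1 + (d + 1)) : Int) := by
      exact_mod_cast osnT_mono (by omega)
    rw [osnGreedy]
    have hcond : n - (osnT j : Int) > 2 * ((j : Int) + 1) := by omega
    simp only [hcond, if_true]
    have harg : n - (osnT j : Int) - ((j : Int) + 1) = n - (osnT (j + 1) : Int) := by omega
    rw [harg]
    have he : j + 1 + 1 + d = j + 1 + (d + 1) := by omega
    have hfe : (osnT (j + 1 + 1 + d) : Int) = (osnT (j + 1 + (d + 1)) : Int) := by rw [he]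
    have hlo' : (osnT (j + 1 + 1 + d) : Int) ≤ n := by rw [hfe]; exact hlo
    have hhi' : n < (osnT (j + 1 + 1 + d) : Int) + (((j + 1 : Nat) : Int) + 1 + (d : Int)) + 1 := by
      omega
    have hih := ih (j + 1) n hlo' hhi'
    push_cast at hih
    rw [show j + 1 + d = j + (d + 1) by omega] at hih
    rw [hih]
    have hR : PySem.List.pyRange ((j : Int) + 1) ((j : Int) + 1 + ((d : Int) + 1)) 1
        = ((j : Int) + 1) :: PySem.List.pyRange ((j : Int) + 1 + 1) ((j : Int) + 1 + ((d : Int) + 1)) 1 :=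
      PySem.List.pyRange_one_cons (by omega)
    push_cast
    rw [hR, List.cons_append]
    ring_nf

-- ===== VERDICT (by name: the statement is the Claim_ definition above) =====
theorem optimal_summands_naive_spec : Claim_equal_optimal_summands_naive := by
  intro n _ hpre
  unfold Spec_optimal_summands_naive optimal_summands_naive optimal_summands_naive_alt
  unfold Pre_optimal_summands_naive at hpre
  obtain ⟨m, hm⟩ : ∃ m : Nat, n = (m : Int) + 1 := ⟨(n - 1).toNat, by omega⟩
  subst hm
  obtain ⟨j, d, t, hfold, hget, hT, ht, htle⟩ := osn_loop_inv m
  rw [hfold]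
  simp only [hget]
  -- A's summands = [1..j+1]; pop removes j+1 leaving [1..j]
  have hrange : PySem.List.pyRange 1 (((j : Int) + 1) + 1) 1
      = PySem.List.pyRange 1 ((j : Int) + 1) 1 ++ [(j : Int) + 1] :=
    PySem.List.pyRange_one_succ_right (by omega)
  rw [hrange, PySem.List.pop?_last]
  simp only []
  rw [osn_sum_pyRange j]
  -- B's side via the greedy characterisation (start j := 0, length d := j)
  have h1j : (0 : Nat) + 1 + j = j + 1 := by omega
  have hlo : (osnT (0 + 1 + j) : Int) ≤ (m : Int) + 1 := by rw [h1j]; exact hT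
  have hhi : (m : Int) + 1 < (osnT (0 + 1 + j) : Int) + (((0 : Nat) : Int) + 1 + (j : Int)) + 1 := by
    rw [h1j]; push_cast; omega
  have hB := osn_greedy_spec j 0 ((m : Int) + 1) hlo hhi
  rw [show ((m : Int) + 1) - (osnT 0 : Int) = (m : Int) + 1 by simp [osnT]] at hB
  rw [show (0 : Nat) + j = j by omega] at hB
  rw [hB]
  push_cast
  ring_nf
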